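-- pv_equiv track=rewrite | github.com/stech999/python | lesson6/add_task6(FOOTBALL).py | score_points
-- ===== SOURCE A (Python) =====
-- def score_points(points):
--     sp = 0
--     for i in range(len(points)):
--         if points[i] == 1:
--             sp += 1
--         if points[i] == 2:
--             sp += 3
--     return sp
-- ===== SOURCE B (Python) =====
-- def score_points(points):
--     def go(lo, hi):
--         if hi - lo == 1:
--             v = points[lo]
--             return 1 if v == 1 else 3 if v == 2 else 0
--         if lo >= hi:
--             return 0
--         mid = (lo + hi) // 2
--         return go(lo, mid) + go(mid, hi)
--     return go(0, len(points))
-- ===== Notes on version B (the rewrite author's own statement) =====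
-- stated objective: alternative
-- what changed: Replaced A's linear index loop with a running accumulator by a divide-and-conquer recursion that binary-splits the index range and sums the two halves' weighted scores.
import Mathlib
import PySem

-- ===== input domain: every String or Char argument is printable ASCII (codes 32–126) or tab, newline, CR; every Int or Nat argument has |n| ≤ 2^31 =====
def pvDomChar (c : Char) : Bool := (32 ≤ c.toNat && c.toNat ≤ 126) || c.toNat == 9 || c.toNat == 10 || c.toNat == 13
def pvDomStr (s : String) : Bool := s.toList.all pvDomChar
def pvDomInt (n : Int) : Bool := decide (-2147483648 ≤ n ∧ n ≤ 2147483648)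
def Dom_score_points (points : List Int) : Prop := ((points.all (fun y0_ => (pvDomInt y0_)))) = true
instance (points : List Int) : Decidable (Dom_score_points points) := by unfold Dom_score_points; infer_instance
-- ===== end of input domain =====

-- B replaces A's linear index loop and running accumulator by a divide-and-conquer
-- recursion that binary-splits the index range and adds the two halves (alternative; same cost).

-- ===== PORT A =====
-- loop body: the two independent ifs on points[i]
def score_points_body (sp v : Int) : Int :=
  let sp := if v = 1 then sp + 1 else sp
  if v = 2 then sp + 3 else sp

-- index loop 'for i in range(len(points))' with two independent ifs
def score_points (points : List Int) : Int :=
  (PySem.List.pyRange 0 (points.length : Int) 1).foldl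
    (fun sp i => score_points_body sp (PySem.List.pyGetD points i 0)) 0

-- ===== PORT B =====
-- inner recursion 'go(lo, hi)'; points[lo] is only reached with 0 ≤ lo < len(points)
-- (hi - lo = 1 and lo < hi from the caller's splitting), so pyGetD's default is never used
def score_points_alt_go (points : List Int) (lo hi : Int) : Int :=
  if hi - lo = 1 then
    let v := PySem.List.pyGetD points lo 0
    if v = 1 then 1 else if v = 2 then 3 else 0
  else if lo ≥ hi then 0
  else
    let mid := PySem.Int.floordiv (lo + hi) 2
    score_points_alt_go points lo mid + score_points_alt_go points mid hi
termination_by (hi - lo).toNat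
decreasing_by
  all_goals
    rename_i h1 h2
    rw [PySem.Int.floordiv_eq_ediv_of_pos (by omega)]
    omega

def score_points_alt (points : List Int) : Int :=
  score_points_alt_go points 0 (points.length : Int)

-- ===== PRECONDITION & SPEC =====
def Spec_score_points (points : List Int) (out : Int) : Prop := out = score_points_alt points
instance (points : List Int) (out : Int) : Decidable (Spec_score_points points out) := by unfold Spec_score_points; infer_instance

-- ===== CLAIM (what is proved, stated in full; the proofs are below) =====
def Claim_equal_score_points : Prop := ∀ (points : List Int), Dom_score_points points → Spec_score_points points (score_points points)

-- ===== LEMMAS AND PROOFS =====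
-- A's whole loop, in closed count form
theorem score_points_foldl (points : List Int) (a : Int) :
    points.foldl score_points_body a
    = a + (points.count 1 : Int) + 3 * (points.count 2 : Int) := by
  induction points generalizing a with
  | nil => simp
  | cons x xs ih =>
    simp only [List.foldl_cons, ih, List.count_cons]
    by_cases h1 : x = 1 <;> by_cases h2 : x = 2 <;>
      simp [score_points_body, h1, h2] <;> ring

-- B's recursion over the segment [lo, hi), in the same closed count form
theorem score_points_alt_go_eq (points : List Int) :
    ∀ (n : Nat) (lo hi : Nat), hi - lo = n → hi ≤ points.length →
    score_points_alt_go points (lo : Int) (hi : Int)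
      = ((((points.drop lo).take (hi - lo)).count 1 : Int))
        + 3 * ((((points.drop lo).take (hi - lo)).count 2 : Int)) := by
  intro n
  induction n using Nat.strong_induction_on with
  | _ n ih =>
    intro lo hi hn hlen
    rw [score_points_alt_go]
    by_cases h1 : (hi : Int) - (lo : Int) = 1
    · have hlo : lo < points.length := by omega
      have hseg : (points.drop lo).take (hi - lo) = [points[lo]] := by
        have : hi - lo = 1 := by omega
        rw [this, List.take_one, List.head?_drop]
        simp [List.getElem?_eq_getElem hlo]
      simp only [h1, hseg, PySem.List.pyGetD_natCast,
        List.getD_eq_getElem?_getD, List.getElem?_eq_getElem hlo]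
      by_cases e1 : points[lo] = 1 <;> by_cases e2 : points[lo] = 2 <;>
        simp [e1, e2]
    · by_cases h2 : (lo : Int) ≥ (hi : Int)
      · have : hi - lo = 0 := by omega
        simp [h1, h2, this]
      · have hlt : lo + 2 ≤ hi := by omega
        have hmid : PySem.Int.floordiv ((lo : Int) + (hi : Int)) 2 = (((lo + hi) / 2 : Nat) : Int) := by
          rw [PySem.Int.floordiv_eq_ediv_of_pos (by omega)]
          omega
        set m : Nat := (lo + hi) / 2 with hm
        have hlom : lo < m := by omega
        have hmhi : m < hi := by omega
        have e1 := ih (m - lo) (by omega) lo m rfl (by omega)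
        have e2 := ih (hi - m) (by omega) m hi rfl hlen
        simp only [h1, h2, if_false, hmid, e1, e2]
        have hsplit : (points.drop lo).take (hi - lo)
            = (points.drop lo).take (m - lo) ++ (points.drop m).take (hi - m) := by
          have : points.drop m = (points.drop lo).drop (m - lo) := by
            rw [List.drop_drop]; congr 1; omega
          rw [this, ← List.take_add]
          congr 1; omega
        rw [hsplit]
        simp [List.count_append]
        ring

-- ===== VERDICT (by name: the statement is the Claim_ definition above) =====
theorem score_points_spec : Claim_equal_score_points := by
  intro points _
  unfold Spec_score_points score_points score_points_alt
  rw [PySem.List.foldl_pyRange_pyGetD' points 0 score_points_body 0 (le_refl 0)]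
  rw [score_points_foldl]
  have h := score_points_alt_go_eq points points.length 0 points.length (by omega) (le_refl _)
  simp only [Nat.cast_zero] at h
  rw [h]
  simp
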